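-- pv_equiv track=rewrite | github.com/felixrauh/conference_scheduler | src/phase2.py | compute_participant_hopping
-- ===== SOURCE A (Python) =====
-- from typing import Dict, List, Set, Tuple, Optional
--
-- def compute_participant_hopping(
--     block_tuples: List[Tuple[str, ...]],
--     participant_prefs: Set[str]
-- ) -> int:
--     """
--     Compute minimum room switches for one participant in a block.
--
--     Uses dynamic programming to find the optimal choice of rooms when
--     the participant prefers multiple talks in a tuple.
--
--     Args:
--         block_tuples: Ordered list of tuples in the block (each tuple has n talks in rooms 0..n-1)
--         participant_prefs: Set of talk_ids this participant wants to attend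
--
--     Returns:
--         Minimum number of room switches needed to attend preferred talks
--     """
--     if not block_tuples:
--         return 0
--
--     n_rooms = len(block_tuples[0])
--     k = len(block_tuples)
--
--     # Get preferred rooms per tuple
--     preferred_rooms = []
--     for ntuple in block_tuples:
--         rooms = set()
--         for r, t in enumerate(ntuple):
--             if t in participant_prefs:
--                 rooms.add(r)
--         preferred_rooms.append(rooms)
--
--     # If 0 or 1 tuples have preferences, no room switches
--     attended_count = sum(1 for rooms in preferred_rooms if rooms)
--     if attended_count <= 1:
--         return 0
--
--     # DP: dp[r] = min switches to be in room r at current tuple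
--     INF = float('inf')
--     dp = [INF] * n_rooms
--
--     # Initialize with first tuple that has preferences
--     first_idx = None
--     for i, rooms in enumerate(preferred_rooms):
--         if rooms:
--             first_idx = i
--             for r in rooms:
--                 dp[r] = 0
--             break
--
--     if first_idx is None:
--         return 0
--
--     # Process remaining tuples
--     for i in range(first_idx + 1, k):
--         if preferred_rooms[i]:
--             # Must attend one of these rooms - compute min cost to reach each
--             new_dp = [INF] * n_rooms
--             for r in preferred_rooms[i]:
--                 for prev_r in range(n_rooms):
--                     if dp[prev_r] < INF:
--                         cost = dp[prev_r] + (0 if prev_r == r else 1)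
--                         new_dp[r] = min(new_dp[r], cost)
--             dp = new_dp
--         # If no preference at this tuple, dp stays the same (no room switch needed)
--
--     # Return minimum cost at the last attended tuple
--     return min(dp[r] for r in range(n_rooms) if dp[r] < INF)
-- ===== SOURCE B (Python) =====
-- from typing import List, Set, Tuple
--
-- def compute_participant_hopping(
--     block_tuples: List[Tuple[str, ...]],
--     participant_prefs: Set[str]
-- ) -> int:
--     """Greedy interval-intersection: keep the set of rooms reachable at the
--     current minimum cost; a switch is forced exactly when the next tuple's
--     preferred rooms are disjoint from it.  O(total talks) instead of A's
--     O(k * n_rooms^2) dynamic programme."""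
--     prefs = set(participant_prefs)
--     sets = []
--     for ntuple in block_tuples:
--         s = {r for r, t in enumerate(ntuple) if t in prefs}
--         if s:
--             sets.append(s)
--     if not sets:
--         return 0
--     switches = 0
--     cur = sets[0]
--     for s in sets[1:]:
--         inter = cur & s
--         if inter:
--             cur = inter
--         else:
--             switches += 1
--             cur = s
--     return switches
-- ===== Notes on version B (the rewrite author's own statement) =====
-- stated objective: faster
-- what changed: Replaces A's dynamic programme over all n_rooms previous rooms per tuple with a single greedy pass that keeps the set of rooms attainable at the current minimum cost and intersects it with each next tuple's preferred-room set, incrementing the switch count exactly when the intersection becomes empty.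
import Mathlib
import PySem

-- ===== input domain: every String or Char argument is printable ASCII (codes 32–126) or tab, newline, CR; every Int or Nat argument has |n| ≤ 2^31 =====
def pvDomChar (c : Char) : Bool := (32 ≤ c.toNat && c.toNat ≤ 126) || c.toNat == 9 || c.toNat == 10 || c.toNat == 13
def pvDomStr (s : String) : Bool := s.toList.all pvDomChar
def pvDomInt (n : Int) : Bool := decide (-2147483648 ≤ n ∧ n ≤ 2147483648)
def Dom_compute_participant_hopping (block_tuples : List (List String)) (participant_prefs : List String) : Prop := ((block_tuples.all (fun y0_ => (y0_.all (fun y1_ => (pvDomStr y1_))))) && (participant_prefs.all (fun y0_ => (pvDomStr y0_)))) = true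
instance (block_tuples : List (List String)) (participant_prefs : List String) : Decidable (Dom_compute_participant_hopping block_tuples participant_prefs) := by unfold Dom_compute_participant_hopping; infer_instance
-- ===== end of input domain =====

-- B replaces A's O(k·n_rooms²) DP over rooms by a one-pass greedy intersection of the
-- per-tuple preferred-room sets (a switch is forced exactly when the intersection empties): faster.

-- ===== PORT A =====
-- rooms = set(); for r, t in enumerate(ntuple): if t in participant_prefs: rooms.add(r)
def pvRoomsA (participant_prefs : List String) (ntuple : List String) : PySem.Set Int :=
  (PySem.List.enumerate ntuple).foldl
    (fun rooms p => if p.2 ∈ participant_prefs then PySem.Set.add rooms p.1 else rooms)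
    PySem.Set.empty

-- min(new_dp[r], cost) where new_dp[r] may be INF (= none)
def pvOptMin (o : Option Int) (c : Int) : Int :=
  match o with
  | none => c
  | some w => min w c

-- body of "for prev_r in range(n_rooms): if dp[prev_r] < INF: … new_dp[r] = min(new_dp[r], cost)"
def pvInner (dp : List (Option Int)) (r : Int) (new_dp : List (Option Int)) (prev_r : Int) : List (Option Int) :=
  match PySem.List.pyGetD dp prev_r none with
  | none => new_dp
  | some v =>
      PySem.List.pySetD new_dp r
        (some (pvOptMin (PySem.List.pyGetD new_dp r none) (v + (if prev_r == r then 0 else 1))))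

-- one DP step for a tuple with a nonempty preferred-room set
def pvStepA (n_rooms : Nat) (dp : List (Option Int)) (S : PySem.Set Int) : List (Option Int) :=
  S.foldl (fun nd r => (PySem.List.pyRange 0 (n_rooms : Int) 1).foldl (pvInner dp r) nd)
    (List.replicate n_rooms none)

-- "first_idx = None; for i, rooms in enumerate(preferred_rooms): if rooms: …; break":
-- returns the dp initialised at the first nonempty set together with the remaining suffix
def pvInitA (n_rooms : Nat) : List (PySem.Set Int) → Option (List (Option Int) × List (PySem.Set Int))
  | [] => none
  | S :: rest =>
      if S.isEmpty then pvInitA n_rooms rest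
      else some (S.foldl (fun dp r => PySem.List.pySetD dp r (some 0)) (List.replicate n_rooms none), rest)

def compute_participant_hopping (block_tuples : List (List String)) (participant_prefs : List String) : Int :=
  match block_tuples with
  | [] => 0
  | t0 :: _ =>
    let n_rooms := t0.length
    let preferred_rooms := block_tuples.map (pvRoomsA participant_prefs)
    let attended_count := (preferred_rooms.filter (fun S => !S.isEmpty)).length
    if attended_count ≤ 1 then 0
    else
      match pvInitA n_rooms preferred_rooms with
      | none => 0
      | some (dp0, rest) =>
        let dpF := rest.foldl (fun dp S => if S.isEmpty then dp else pvStepA n_rooms dp S) dp0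
        -- min(dp[r] for r in range(n_rooms) if dp[r] < INF); Python raises on an empty
        -- generator — unreachable under Pre_, so the total form returns 0 there
        (PySem.List.min? ((PySem.List.pyRange 0 (n_rooms : Int) 1).filterMap
            (fun r => PySem.List.pyGetD dpF r none)) (fun x => x)).getD 0

-- ===== PORT B =====
-- s = {r for r, t in enumerate(ntuple) if t in prefs}
def pvRoomsB (participant_prefs : List String) (ntuple : List String) : PySem.Set Int :=
  PySem.Set.ofList ((PySem.List.enumerate ntuple).filterMap
    (fun p => if p.2 ∈ participant_prefs then some p.1 else none))

-- inter = cur & s; if inter: cur = inter else: switches += 1; cur = s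
def pvGreedyStep (st : Int × PySem.Set Int) (s : PySem.Set Int) : Int × PySem.Set Int :=
  let inter := PySem.Set.inter st.2 s
  if inter.isEmpty then (st.1 + 1, s) else (st.1, inter)

def compute_participant_hopping_alt (block_tuples : List (List String)) (participant_prefs : List String) : Int :=
  let sets := (block_tuples.map (pvRoomsB participant_prefs)).filter (fun s => !s.isEmpty)
  match sets with
  | [] => 0
  | s0 :: rest => (rest.foldl pvGreedyStep (0, s0)).1

-- ===== PRECONDITION & SPEC =====
-- Pre_ excludes exactly the inputs on which A raises IndexError: those where at least two
-- tuples contain preferred talks AND some preferred talk sits at a room index ≥ the length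
-- of the first tuple (A sizes its dp array by the first tuple); A returns on everything else.
def Pre_compute_participant_hopping (block_tuples : List (List String)) (participant_prefs : List String) : Prop :=
  (block_tuples.filter (fun t => decide (∃ p ∈ PySem.List.enumerate t, p.2 ∈ participant_prefs))).length ≤ 1 ∨
  (∀ t ∈ block_tuples, ∀ p ∈ PySem.List.enumerate t, p.2 ∈ participant_prefs →
      p.1 < ((block_tuples.headD []).length : Int))
instance (block_tuples : List (List String)) (participant_prefs : List String) : Decidable (Pre_compute_participant_hopping block_tuples participant_prefs) := by unfold Pre_compute_participant_hopping; infer_instance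

def pvWitness_compute_participant_hopping : List (List String) × List String :=
  ([["a", "b"], ["b", "c"]], ["a", "c"])

def Spec_compute_participant_hopping (block_tuples : List (List String)) (participant_prefs : List String) (out : Int) : Prop := out = compute_participant_hopping_alt block_tuples participant_prefs
instance (block_tuples : List (List String)) (participant_prefs : List String) (out : Int) : Decidable (Spec_compute_participant_hopping block_tuples participant_prefs out) := by unfold Spec_compute_participant_hopping; infer_instance

-- ===== CLAIM (what is proved, stated in full; the proofs are below) =====
def Claim_equal_compute_participant_hopping : Prop := ∀ (block_tuples : List (List String)) (participant_prefs : List String), Dom_compute_participant_hopping block_tuples participant_prefs → Pre_compute_participant_hopping block_tuples participant_prefs → Spec_compute_participant_hopping block_tuples participant_prefs (compute_participant_hopping block_tuples participant_prefs)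

-- ===== LEMMAS AND PROOFS =====

-- value stored at (in-range) index r of a dp list; none models Python's INF
def pvVal (dp : List (Option Int)) (r : Int) : Option Int := PySem.List.pyGetD dp r none

-- the loop invariant relating A's dp array to B's greedy state (c, C):
-- dp holds c on C, c+1 on S \ C (S = room set of the last attended tuple), INF elsewhere
def pvInv (n : Nat) (c : Int) (C S : List Int) (dp : List (Option Int)) : Prop :=
  dp.length = n ∧ C ≠ [] ∧ (∀ r ∈ C, r ∈ S) ∧ (∀ r ∈ S, 0 ≤ r ∧ r < (n : Int)) ∧
  (∀ r : Int, 0 ≤ r → r < (n : Int) →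
      pvVal dp r = if r ∈ C then some c else if r ∈ S then some (c + 1) else none)

def pvFoldMin (o : Option Int) (cs : List Int) : Option Int :=
  cs.foldl (fun o c => some (pvOptMin o c)) o

lemma pvRooms_eq (ps t : List String) : pvRoomsA ps t = pvRoomsB ps t := by
  have aux : ∀ (l : List (Int × String)) (s : PySem.Set Int),
      l.foldl (fun s p => if p.2 ∈ ps then PySem.Set.add s p.1 else s) s
        = (l.filterMap (fun p => if p.2 ∈ ps then some p.1 else none)).foldl PySem.Set.add s := by
    intro l
    induction l with
    | nil => intro s; rfl
    | cons p l ih =>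
      intro s
      by_cases h : p.2 ∈ ps <;> simp [h, ih]
  simp [pvRoomsA, pvRoomsB, aux, PySem.Set.ofList_eq_foldl, PySem.Set.empty]

lemma pvVal_pySetD (xs : List (Option Int)) (i j : Int) (v : Option Int)
    (h0 : 0 ≤ i) (hi : i < (xs.length : Int)) (h0j : 0 ≤ j) (hj : j < (xs.length : Int)) :
    pvVal (PySem.List.pySetD xs i v) j = if j = i then v else pvVal xs j := by
  lift i to ℕ using h0 with ni
  lift j to ℕ using h0j with nj
  have hni : ni < xs.length := by exact_mod_cast hi
  unfold pvVal
  rw [PySem.List.pyGetD_pySetD_natCast xs ni nj v none hni]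
  simp [Nat.cast_inj]

lemma pvVal_replicate (n : Nat) (j : Int) :
    pvVal (List.replicate n (none : Option Int)) j = none := by
  unfold pvVal PySem.List.pyGetD
  rcases h : PySem.List.pyGet? (List.replicate n (none : Option Int)) j with _ | v
  · rfl
  · have := PySem.List.mem_of_pyGet?_eq_some _ h
    simp [List.eq_of_mem_replicate this]

lemma pvFoldMin_min? (o : Option Int) (cs : List Int) :
    pvFoldMin o cs = (o.toList ++ cs).min? := by
  have aux : ∀ (cs : List Int) (w : Int), pvFoldMin (some w) cs = some (cs.foldl min w) := by
    intro cs
    induction cs with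
    | nil => intro w; rfl
    | cons c cs ih => intro w; simpa [pvFoldMin, pvOptMin, List.foldl_cons] using ih (min w c)
  cases o with
  | none =>
    cases cs with
    | nil => rfl
    | cons c cs => simpa [pvFoldMin, pvOptMin, List.foldl_cons, List.min?] using aux cs c
  | some w => simpa [List.min?] using aux cs w

lemma inner_fold_spec (dp : List (Option Int)) (r : Int) (l : List Int)
    (nd : List (Option Int)) (h0 : 0 ≤ r) (hr : r < (nd.length : Int)) :
    (l.foldl (pvInner dp r) nd).length = nd.length ∧
    (∀ j : Int, 0 ≤ j → j < (nd.length : Int) → j ≠ r →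
        pvVal (l.foldl (pvInner dp r) nd) j = pvVal nd j) ∧
    pvVal (l.foldl (pvInner dp r) nd) r
      = pvFoldMin (pvVal nd r)
          (l.filterMap (fun p => (pvVal dp p).map (fun v => v + (if p == r then 0 else 1)))) := by
  induction l generalizing nd with
  | nil => exact ⟨rfl, fun _ _ _ _ => rfl, by simp [pvFoldMin]⟩
  | cons p l ih =>
    rcases hdp : PySem.List.pyGetD dp p none with _ | v
    · have hskip : pvInner dp r nd p = nd := by unfold pvInner; rw [hdp]
      have h3 := ih nd hr
      refine ⟨?_, ?_, ?_⟩
      · simpa [List.foldl_cons, hskip] using h3.1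
      · intro j hj0 hjn hjr
        simpa [List.foldl_cons, hskip] using h3.2.1 j hj0 hjn hjr
      · simpa [List.foldl_cons, hskip, List.filterMap_cons, pvVal, hdp] using h3.2.2
    · set w := pvOptMin (PySem.List.pyGetD nd r none) (v + (if p == r then 0 else 1)) with hw
      have hstep : pvInner dp r nd p = PySem.List.pySetD nd r (some w) := by
        unfold pvInner; rw [hdp]
      have hlen' : (PySem.List.pySetD nd r (some w)).length = nd.length :=
        PySem.List.length_pySetD nd r (some w)
      have h3 := ih (PySem.List.pySetD nd r (some w)) (by rw [hlen']; exact hr)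
      refine ⟨?_, ?_, ?_⟩
      · rw [List.foldl_cons, hstep]; rw [h3.1, hlen']
      · intro j hj0 hjn hjr
        rw [List.foldl_cons, hstep, h3.2.1 j hj0 (by rw [hlen']; exact hjn) hjr,
          pvVal_pySetD nd r j (some w) h0 hr hj0 hjn, if_neg hjr]
      · rw [List.foldl_cons, hstep, h3.2.2,
          pvVal_pySetD nd r r (some w) h0 hr h0 hr, if_pos rfl]
        simp only [List.filterMap_cons, pvVal, hdp, Option.map_some]
        simp [pvFoldMin, hw, List.foldl_cons]

lemma init_fold_spec (l : List Int) (nd : List (Option Int))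
    (hb : ∀ r ∈ l, 0 ≤ r ∧ r < (nd.length : Int)) :
    (l.foldl (fun dp r => PySem.List.pySetD dp r (some 0)) nd).length = nd.length ∧
    (∀ j : Int, 0 ≤ j → j < (nd.length : Int) →
        pvVal (l.foldl (fun dp r => PySem.List.pySetD dp r (some 0)) nd) j
          = if j ∈ l then some 0 else pvVal nd j) := by
  induction l generalizing nd with
  | nil => exact ⟨rfl, fun _ _ _ => by simp⟩
  | cons r l ih =>
    have hr := hb r (List.mem_cons_self ..)
    have hlen' : (PySem.List.pySetD nd r (some 0)).length = nd.length :=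
      PySem.List.length_pySetD nd r (some 0)
    have h2 := ih (PySem.List.pySetD nd r (some 0))
      (fun x hx => by rw [hlen']; exact hb x (List.mem_cons_of_mem _ hx))
    refine ⟨by rw [List.foldl_cons, h2.1, hlen'], ?_⟩
    intro j hj0 hjn
    rw [List.foldl_cons, h2.2 j hj0 (by rw [hlen']; exact hjn),
      pvVal_pySetD nd r j (some 0) hr.1 hr.2 hj0 hjn]
    by_cases hjl : j ∈ l
    · simp [hjl]
    · by_cases hjr : j = r <;> simp [hjl, hjr]

lemma step_spec (n : Nat) (dp : List (Option Int)) (c : Int) (C S : List Int)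
    (S' : PySem.Set Int) (hInv : pvInv n c C S dp) (hne : S' ≠ [])
    (hb : ∀ r ∈ S', 0 ≤ r ∧ r < (n : Int)) :
    pvInv n (pvGreedyStep (c, C) S').1 (pvGreedyStep (c, C) S').2 S' (pvStepA n dp S') := by
  obtain ⟨hlen, hCne, hCS, hSb, hval⟩ := hInv
  set tv : Int → Int := fun j => if j ∈ C then c else c + 1 with htv
  set cands : Int → List Int := fun r =>
    (PySem.List.pyRange 0 (n : Int) 1).filterMap
      (fun p => (pvVal dp p).map (fun v => v + (if p == r then 0 else 1))) with hcands
  have hcmem : ∀ (r x : Int), x ∈ cands r ↔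
      ∃ p : Int, (0 ≤ p ∧ p < (n : Int)) ∧ ∃ v, pvVal dp p = some v ∧ x = v + (if p = r then 0 else 1) := by
    intro r x
    simp only [hcands, List.mem_filterMap, PySem.List.mem_pyRange_one, Option.map_eq_some_iff,
      beq_iff_eq]
    constructor
    · rintro ⟨p, hp, v, hv, rfl⟩
      exact ⟨p, hp, v, hv, rfl⟩
    · rintro ⟨p, hp, v, hv, rfl⟩
      exact ⟨p, hp, v, hv, rfl⟩
  have hlb : ∀ r, ∀ x ∈ cands r, tv r ≤ x := by
    intro r x hx
    rw [hcmem] at hx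
    obtain ⟨p, hp, v, hv, rfl⟩ := hx
    rw [hval p hp.1 hp.2] at hv
    by_cases hpC : p ∈ C
    · rw [if_pos hpC] at hv
      obtain rfl : c = v := Option.some.inj hv
      by_cases hpr : p = r
      · subst hpr
        simp only [htv, if_pos hpC]
        omega
      · simp only [htv, if_neg hpr]; split_ifs <;> omega
    · rw [if_neg hpC] at hv
      by_cases hpS : p ∈ S
      · rw [if_pos hpS] at hv
        obtain rfl : c + 1 = v := Option.some.inj hv
        simp only [htv]; split_ifs <;> omega
      · rw [if_neg hpS] at hv; exact absurd hv (by simp)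
  have htvmem : ∀ r : Int, 0 ≤ r → r < (n : Int) → tv r ∈ cands r := by
    intro r h0 hrn
    by_cases hrC : r ∈ C
    · rw [hcmem]
      exact ⟨r, ⟨h0, hrn⟩, c, by rw [hval r h0 hrn, if_pos hrC], by simp [htv, hrC]⟩
    · obtain ⟨p0, hp0⟩ := List.exists_mem_of_ne_nil C hCne
      have hp0b := hSb p0 (hCS p0 hp0)
      rw [hcmem]
      refine ⟨p0, hp0b, c, by rw [hval p0 hp0b.1 hp0b.2, if_pos hp0], ?_⟩
      have hne' : p0 ≠ r := fun h => hrC (h ▸ hp0)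
      simp [htv, hrC, hne']
  have hfold : ∀ r : Int, 0 ≤ r → r < (n : Int) → ∀ o : Option Int,
      (o = none ∨ o = some (tv r)) → pvFoldMin o (cands r) = some (tv r) := by
    intro r h0 hrn o ho
    rw [pvFoldMin_min?]
    rcases ho with rfl | rfl
    · simp only [Option.toList_none, List.nil_append]
      rw [List.min?_eq_some_iff]
      exact ⟨htvmem r h0 hrn, hlb r⟩
    · simp only [Option.toList_some, List.cons_append]
      rw [List.min?_eq_some_iff]
      refine ⟨List.mem_cons_self .., ?_⟩
      intro b hb'
      rcases List.mem_cons.1 hb' with rfl | hb''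
      · exact le_refl _
      · exact hlb r b hb''
  have houter : ∀ (l : List Int), (∀ r ∈ l, 0 ≤ r ∧ r < (n : Int)) →
      ∀ nd : List (Option Int), nd.length = n →
      (∀ j : Int, 0 ≤ j → j < (n : Int) → (pvVal nd j = none ∨ pvVal nd j = some (tv j))) →
      (l.foldl (fun nd r => (PySem.List.pyRange 0 (n : Int) 1).foldl (pvInner dp r) nd) nd).length = n ∧
      (∀ j : Int, 0 ≤ j → j < (n : Int) →
        pvVal (l.foldl (fun nd r => (PySem.List.pyRange 0 (n : Int) 1).foldl (pvInner dp r) nd) nd) j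
          = if j ∈ l then some (tv j) else pvVal nd j) := by
    intro l
    induction l with
    | nil => intro _ nd hndl _; exact ⟨hndl, fun j _ _ => by simp⟩
    | cons r l ih =>
      intro hbl nd hndl hnd
      have hrb := hbl r (List.mem_cons_self ..)
      have hinner := inner_fold_spec dp r (PySem.List.pyRange 0 (n : Int) 1) nd hrb.1
        (by rw [hndl]; exact hrb.2)
      have hnd1len : ((PySem.List.pyRange 0 (n : Int) 1).foldl (pvInner dp r) nd).length = n := by
        rw [hinner.1, hndl]
      have hatr : pvVal ((PySem.List.pyRange 0 (n : Int) 1).foldl (pvInner dp r) nd) r = some (tv r) := by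
        rw [hinner.2.2]
        exact hfold r hrb.1 hrb.2 _ (hnd r hrb.1 hrb.2)
      have hnd1hyp : ∀ j : Int, 0 ≤ j → j < (n : Int) →
          (pvVal ((PySem.List.pyRange 0 (n : Int) 1).foldl (pvInner dp r) nd) j = none ∨
           pvVal ((PySem.List.pyRange 0 (n : Int) 1).foldl (pvInner dp r) nd) j = some (tv j)) := by
        intro j hj0 hjn
        by_cases hjr : j = r
        · subst hjr; exact Or.inr hatr
        · rw [hinner.2.1 j hj0 (by rw [hndl]; exact hjn) hjr]; exact hnd j hj0 hjn
      have h2 := ih (fun x hx => hbl x (List.mem_cons_of_mem _ hx)) _ hnd1len hnd1hyp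
      refine ⟨by simpa [List.foldl_cons] using h2.1, ?_⟩
      intro j hj0 hjn
      rw [List.foldl_cons, h2.2 j hj0 hjn]
      by_cases hjl : j ∈ l
      · simp [hjl]
      · by_cases hjr : j = r
        · subst hjr; simp [hjl, hatr]
        · rw [hinner.2.1 j hj0 (by rw [hndl]; exact hjn) hjr]; simp [hjl, hjr]
  have hstep := houter S' hb (List.replicate n none) (by simp)
    (fun j _ _ => Or.inl (pvVal_replicate n j))
  have hfin1 : (pvStepA n dp S').length = n := hstep.1
  have hfin2 : ∀ j : Int, 0 ≤ j → j < (n : Int) →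
      pvVal (pvStepA n dp S') j = if j ∈ S' then some (tv j) else none := by
    intro j hj0 hjn
    rw [pvStepA, hstep.2 j hj0 hjn, pvVal_replicate]
  rcases hI : (PySem.Set.inter C S').isEmpty with _ | _
  · -- intersection nonempty: stay at cost c, cur := inter
    have hIter : PySem.Set.inter C S' ≠ [] := by
      intro h; rw [h] at hI; simp at hI
    refine ⟨hfin1, ?_, ?_, hb, ?_⟩
    · simpa [pvGreedyStep, hI] using hIter
    · simp only [pvGreedyStep, hI]
      intro r hr
      exact ((PySem.Set.mem_inter C S' r).1 hr).2
    · simp only [pvGreedyStep, hI]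
      intro j hj0 hjn
      rw [hfin2 j hj0 hjn]
      by_cases hjS' : j ∈ S'
      · by_cases hjC : j ∈ C
        · have : j ∈ PySem.Set.inter C S' := (PySem.Set.mem_inter C S' j).2 ⟨hjC, hjS'⟩
          simp [hjS', htv, hjC, this]
        · have : j ∉ PySem.Set.inter C S' := fun h => hjC ((PySem.Set.mem_inter C S' j).1 h).1
          simp [hjS', htv, hjC, this]
      · have : j ∉ PySem.Set.inter C S' := fun h => hjS' ((PySem.Set.mem_inter C S' j).1 h).2
        simp [hjS', this]
  · -- intersection empty: switch, cost c+1, cur := S'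
    have hIter : ∀ j, ¬(j ∈ C ∧ j ∈ S') := by
      intro j hj
      have : j ∈ PySem.Set.inter C S' := (PySem.Set.mem_inter C S' j).2 hj
      rw [List.isEmpty_iff.1 hI] at this
      simp at this
    refine ⟨hfin1, by simpa [pvGreedyStep, hI] using hne, by simp [pvGreedyStep, hI], hb, ?_⟩
    simp only [pvGreedyStep, hI]
    intro j hj0 hjn
    rw [hfin2 j hj0 hjn]
    by_cases hjS' : j ∈ S'
    · have hjC : j ∉ C := fun h => hIter j ⟨h, hjS'⟩
      simp [hjS', htv, hjC]
    · simp [hjS']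

lemma loop_spec (n : Nat) (rest : List (PySem.Set Int)) :
    ∀ (dp : List (Option Int)) (c : Int) (C S : List Int),
    pvInv n c C S dp → (∀ S' ∈ rest, ∀ r ∈ S', 0 ≤ r ∧ r < (n : Int)) →
    ∃ S'',
      pvInv n ((rest.filter (fun s => !s.isEmpty)).foldl pvGreedyStep (c, C)).1
              ((rest.filter (fun s => !s.isEmpty)).foldl pvGreedyStep (c, C)).2
              S''
              (rest.foldl (fun dp S => if S.isEmpty then dp else pvStepA n dp S) dp) := by
  induction rest with
  | nil => intro dp c C S hInv _; exact ⟨S, hInv⟩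
  | cons S' rest ih =>
    intro dp c C S hInv hb
    rcases hS' : S'.isEmpty with _ | _
    · -- S' nonempty: one DP step = one greedy step
      have hne : S' ≠ [] := by intro h; rw [h] at hS'; simp at hS'
      have hstep := step_spec n dp c C S S' hInv hne (hb S' (List.mem_cons_self ..))
      have h2 := ih (pvStepA n dp S') (pvGreedyStep (c, C) S').1 (pvGreedyStep (c, C) S').2 S'
        hstep (fun s hs => hb s (List.mem_cons_of_mem _ hs))
      rw [List.filter_cons_of_pos (by simp [hS']), List.foldl_cons, List.foldl_cons,
        if_neg (by simp [hS'])]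
      exact h2
    · -- S' empty: both sides skip it
      have h2 := ih dp c C S hInv (fun s hs => hb s (List.mem_cons_of_mem _ hs))
      rw [List.filter_cons_of_neg (by simp [hS']), List.foldl_cons, if_pos hS']
      exact h2

lemma final_min_spec (n : Nat) (c : Int) (C S : List Int) (dp : List (Option Int))
    (hInv : pvInv n c C S dp) :
    (PySem.List.min? ((PySem.List.pyRange 0 (n : Int) 1).filterMap
        (fun r => PySem.List.pyGetD dp r none)) (fun x => x)).getD 0 = c := by
  obtain ⟨hlen, hCne, hCS, hSb, hval⟩ := hInv
  have hmem : ∀ x : Int, x ∈ (PySem.List.pyRange 0 (n : Int) 1).filterMap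
      (fun r => PySem.List.pyGetD dp r none) ↔
      ∃ r : Int, (0 ≤ r ∧ r < (n : Int)) ∧ pvVal dp r = some x := by
    intro x
    simp only [List.mem_filterMap, PySem.List.mem_pyRange_one, pvVal]
  have hcmem : c ∈ (PySem.List.pyRange 0 (n : Int) 1).filterMap
      (fun r => PySem.List.pyGetD dp r none) := by
    obtain ⟨r0, hr0⟩ := List.exists_mem_of_ne_nil C hCne
    have hb0 := hSb r0 (hCS r0 hr0)
    exact (hmem c).2 ⟨r0, hb0, by rw [hval r0 hb0.1 hb0.2, if_pos hr0]⟩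
  have hlb : ∀ x ∈ (PySem.List.pyRange 0 (n : Int) 1).filterMap
      (fun r => PySem.List.pyGetD dp r none), c ≤ x := by
    intro x hx
    obtain ⟨r, hr, hx⟩ := (hmem x).1 hx
    rw [hval r hr.1 hr.2] at hx
    split_ifs at hx with h1 h2
    · exact le_of_eq (Option.some.inj hx)
    · have := Option.some.inj hx
      omega
  rcases hmin : PySem.List.min? ((PySem.List.pyRange 0 (n : Int) 1).filterMap
      (fun r => PySem.List.pyGetD dp r none)) (fun x => x) with _ | m
  · rw [PySem.List.min?_eq_none_iff] at hmin
    rw [hmin] at hcmem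
    simp at hcmem
  · have h1 : m ∈ _ := PySem.List.min?_mem hmin
    have h2 := PySem.List.min?_isMin hmin c hcmem
    have h3 := hlb m h1
    simp only [Option.getD_some]
    omega

lemma initA_spec (n : Nat) (l : List (PySem.Set Int)) :
    (l.filter (fun s => !s.isEmpty) = [] → pvInitA n l = none) ∧
    (∀ S1 tail, l.filter (fun s => !s.isEmpty) = S1 :: tail →
       ∃ rest, pvInitA n l
           = some (S1.foldl (fun dp r => PySem.List.pySetD dp r (some 0)) (List.replicate n none), rest) ∧
         rest.filter (fun s => !s.isEmpty) = tail ∧ ∀ s ∈ rest, s ∈ l) := by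
  induction l with
  | nil => exact ⟨fun _ => rfl, fun S1 tail h => by simp at h⟩
  | cons S l ih =>
    rcases hS : S.isEmpty with _ | _
    · -- S nonempty
      constructor
      · intro h; rw [List.filter_cons_of_pos (by simp [hS])] at h; exact absurd h (by simp)
      · intro S1 tail h
        rw [List.filter_cons_of_pos (by simp [hS])] at h
        obtain ⟨h1, h2⟩ := List.cons.inj h
        subst h1
        exact ⟨l, by simp [pvInitA, hS], by rw [h2], fun s hs => List.mem_cons_of_mem _ hs⟩
    · -- S empty: skipped by both
      constructor
      · intro h; rw [List.filter_cons_of_neg (by simp [hS])] at h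
        simpa [pvInitA, hS] using (ih.1 h)
      · intro S1 tail h
        rw [List.filter_cons_of_neg (by simp [hS])] at h
        obtain ⟨rest, hinit, hfil, hmem⟩ := ih.2 S1 tail h
        exact ⟨rest, by simpa [pvInitA, hS] using hinit, hfil,
          fun s hs => List.mem_cons_of_mem _ (hmem s hs)⟩

lemma pvRoomsB_mem (ps t : List String) (r : Int) :
    r ∈ pvRoomsB ps t ↔ ∃ p ∈ PySem.List.enumerate t, p.2 ∈ ps ∧ p.1 = r := by
  simp only [pvRoomsB, PySem.Set.mem_ofList, List.mem_filterMap]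
  constructor
  · rintro ⟨p, hp, hx⟩
    by_cases h : p.2 ∈ ps
    · rw [if_pos h] at hx
      exact ⟨p, hp, h, Option.some.inj hx⟩
    · rw [if_neg h] at hx
      exact absurd hx (by simp)
  · rintro ⟨p, hp, h, rfl⟩
    exact ⟨p, hp, by rw [if_pos h]⟩

lemma pvRoomsB_nonempty_eq (ps t : List String) :
    (!(pvRoomsB ps t).isEmpty) = decide (∃ p ∈ PySem.List.enumerate t, p.2 ∈ ps) := by
  by_cases h : ∃ p ∈ PySem.List.enumerate t, p.2 ∈ ps
  · obtain ⟨p, hp, h2⟩ := h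
    have hm : p.1 ∈ pvRoomsB ps t := (pvRoomsB_mem ps t p.1).2 ⟨p, hp, h2, rfl⟩
    have : (pvRoomsB ps t).isEmpty = false := by
      rcases he : pvRoomsB ps t with _ | _
      · rw [he] at hm; simp at hm
      · rfl
    simp only [this, Bool.not_false]
    symm
    rw [decide_eq_true_iff]
    exact ⟨p, hp, h2⟩
  · have : pvRoomsB ps t = [] := by
      rcases he : pvRoomsB ps t with _ | ⟨x, xs⟩
      · rfl
      · exfalso
        have hm : x ∈ pvRoomsB ps t := by rw [he]; exact List.mem_cons_self ..
        obtain ⟨p, hp, h2, _⟩ := (pvRoomsB_mem ps t x).1 hm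
        exact h ⟨p, hp, h2⟩
    simp [this, h]

-- ===== VERDICT (by name: the statement is the Claim_ definition above) =====
theorem compute_participant_hopping_spec : Claim_equal_compute_participant_hopping := by
  unfold Claim_equal_compute_participant_hopping
  intro bt ps _ hPre
  unfold Spec_compute_participant_hopping
  rcases bt with _ | ⟨t0, bts⟩
  · rfl
  set n := t0.length with hn
  have hAB : (t0 :: bts).map (pvRoomsA ps) = (t0 :: bts).map (pvRoomsB ps) :=
    List.map_congr_left (fun t _ => pvRooms_eq ps t)
  have hcount : ((t0 :: bts).filter
        (fun t => decide (∃ p ∈ PySem.List.enumerate t, p.2 ∈ ps))).length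
      = (((t0 :: bts).map (pvRoomsB ps)).filter (fun s => !s.isEmpty)).length := by
    rw [List.filter_map, List.length_map]
    congr 1
    apply List.filter_congr
    intro t _
    simp only [Function.comp_apply]
    rw [pvRoomsB_nonempty_eq]
  simp only [compute_participant_hopping, compute_participant_hopping_alt, hAB]
  by_cases hatt : (((t0 :: bts).map (pvRoomsB ps)).filter (fun s => !s.isEmpty)).length ≤ 1
  · rw [if_pos hatt]
    rcases hsets : ((t0 :: bts).map (pvRoomsB ps)).filter (fun s => !s.isEmpty) with _ | ⟨s0, tail⟩
    · rw [hsets]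
    · rw [hsets] at hatt
      have : tail = [] := by
        rcases tail with _ | _
        · rfl
        · simp at hatt
      subst this
      rw [hsets]
      rfl
  · rw [if_neg hatt]
    -- Pre_'s first disjunct fails, so the bound on room indices holds
    have hbound : ∀ t ∈ (t0 :: bts), ∀ p ∈ PySem.List.enumerate t, p.2 ∈ ps →
        p.1 < (n : Int) := by
      rcases hPre with h1 | h2
      · rw [hcount] at h1; omega
      · intro t ht p hp hm
        simpa using h2 t ht p hp hm
    have hSb : ∀ S ∈ (t0 :: bts).map (pvRoomsB ps), ∀ r ∈ S, 0 ≤ r ∧ r < (n : Int) := by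
      intro S hS r hr
      obtain ⟨t, ht, rfl⟩ := List.mem_map.1 hS
      obtain ⟨p, hp, hm, rfl⟩ := (pvRoomsB_mem ps t r).1 hr
      refine ⟨?_, hbound t ht p hp hm⟩
      obtain ⟨k, hk, rfl⟩ := (PySem.List.mem_enumerate_iff t 0 p).1 hp
      simp
    rcases hsets : ((t0 :: bts).map (pvRoomsB ps)).filter (fun s => !s.isEmpty) with _ | ⟨S1, tail⟩
    · rw [hsets] at hatt; simp at hatt
    obtain ⟨rest, hinit, hfil, hmemrest⟩ :=
      (initA_spec n ((t0 :: bts).map (pvRoomsB ps))).2 S1 tail hsets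
    have hS1mem : S1 ∈ ((t0 :: bts).map (pvRoomsB ps)).filter (fun s => !s.isEmpty) := by
      rw [hsets]; exact List.mem_cons_self ..
    have hS1map : S1 ∈ (t0 :: bts).map (pvRoomsB ps) := List.mem_of_mem_filter hS1mem
    have hS1ne : S1 ≠ [] := by
      have := List.of_mem_filter hS1mem
      intro h; rw [h] at this; simp at this
    have hS1b : ∀ r ∈ S1, 0 ≤ r ∧ r < (n : Int) := hSb S1 hS1map
    have hinitf := init_fold_spec S1 (List.replicate n none)
      (by simpa using hS1b)
    have hInv0 : pvInv n 0 S1 S1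
        (S1.foldl (fun dp r => PySem.List.pySetD dp r (some 0)) (List.replicate n none)) := by
      refine ⟨by simpa using hinitf.1, hS1ne, fun r hr => hr, hS1b, ?_⟩
      intro j hj0 hjn
      rw [hinitf.2 j hj0 (by simpa using hjn), pvVal_replicate]
      by_cases hj : j ∈ S1 <;> simp [hj]
    obtain ⟨S'', hInvF⟩ := loop_spec n rest _ 0 S1 S1 hInv0
      (fun S' hS' => hSb S' (hmemrest S' hS'))
    rw [hinit, hsets]
    rw [hfil] at hInvF
    exact final_min_spec n _ _ S'' _ hInvF
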